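-- pv_equiv track=rewrite | github.com/XyzHuy/-DL-Fine-tuning-coding-model | data/solution/Solution2223.py | sumScores
-- ===== SOURCE A (Python) =====
-- def sumScores(s: str) -> int:
--     def z_function(s):
--         n = len(s)
--         z = [0] * n
--         l, r = 0, 0
--         for i in range(1, n):
--             if i <= r:
--                 z[i] = min(r - i + 1, z[i - l])
--             while i + z[i] < n and s[z[i]] == s[i + z[i]]:
--                 z[i] += 1
--             if i + z[i] - 1 > r:
--                 l, r = i, i + z[i] - 1
--         return z
--
--     # Calculate the Z-function for the string
--     z_values = z_function(s)
--
--     # The score for s_n (the full string) is n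
--     total_score = len(s)
--
--     # Add the scores for all other prefixes
--     total_score += sum(z_values)
--
--     return total_score
-- ===== SOURCE B (Python) =====
-- def sumScores(s: str) -> int:
--     n = len(s)
--     total = 0
--     for i in range(n):
--         k = 0
--         while i + k < n and s[k] == s[i + k]:
--             k += 1
--         total += k
--     return total
-- ===== Notes on version B (the rewrite author's own statement) =====
-- stated objective: simpler
-- what changed: Replaces the linear Z-function (with its l/r window bookkeeping and z array) by the naive definition: for each suffix, scan directly for its longest common prefix with the whole string and sum the lengths (the i=0 scan contributes n).
import Mathlib
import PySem

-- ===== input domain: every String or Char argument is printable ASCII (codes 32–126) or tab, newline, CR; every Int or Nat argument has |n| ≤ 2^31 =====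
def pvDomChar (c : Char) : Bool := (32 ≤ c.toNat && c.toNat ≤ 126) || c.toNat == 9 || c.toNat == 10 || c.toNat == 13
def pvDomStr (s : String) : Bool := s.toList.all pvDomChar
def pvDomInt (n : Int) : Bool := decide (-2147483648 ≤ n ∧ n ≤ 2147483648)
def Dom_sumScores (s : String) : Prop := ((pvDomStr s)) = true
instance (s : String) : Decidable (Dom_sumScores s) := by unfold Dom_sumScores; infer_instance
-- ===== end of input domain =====

-- B replaces the linear Z-function (l/r window + z array) by the naive per-suffix LCP scan summed directly; objective: simpler.


-- ===== PORT A =====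
-- the inner `while i + z[i] < n and s[z[i]] == s[i + z[i]]: z[i] += 1` loop of A's z_function
def pvZWhile (cs : List Char) (i : Nat) (z : Nat) : Nat :=
  if h : i + z < cs.length ∧ cs[z]? = cs[i + z]? then pvZWhile cs i (z + 1) else z
termination_by cs.length - (i + z)
decreasing_by omega

-- one iteration of A's `for i in range(1, n)` loop; state = (z array, l, r)
def pvZStep (cs : List Char) (st : List Nat × Nat × Nat) (i : Nat) : List Nat × Nat × Nat :=
  let zi := pvZWhile cs i
    (if i ≤ st.2.2 then min (st.2.2 - i + 1) (st.1.getD (i - st.2.1) 0) else st.1.getD i 0)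
  (st.1.set i zi, if st.2.2 + 1 < i + zi then (i, i + zi - 1) else (st.2.1, st.2.2))

def sumScores (s : String) : Int :=
  let cs := s.toList
  let n := cs.length
  let zf := ((List.range' 1 (n - 1)).foldl (pvZStep cs) (List.replicate n 0, 0, 0)).1
  (n : Int) + ((zf.foldl (· + ·) 0 : Nat) : Int)

-- ===== PORT B =====
-- B's inner `while i + k < n and s[k] == s[i + k]: k += 1` scan
def pvLcp (cs : List Char) (i : Nat) (k : Nat) : Nat :=
  if h : i + k < cs.length ∧ cs[k]? = cs[i + k]? then pvLcp cs i (k + 1) else k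
termination_by cs.length - (i + k)
decreasing_by omega

def sumScores_alt (s : String) : Int :=
  let cs := s.toList
  (List.range cs.length).foldl (fun acc i => acc + (pvLcp cs i 0 : Int)) 0

-- ===== PRECONDITION & SPEC =====
def Spec_sumScores (s : String) (out : Int) : Prop := out = sumScores_alt s
instance (s : String) (out : Int) : Decidable (Spec_sumScores s out) := by unfold Spec_sumScores; infer_instance

-- ===== CLAIM (what is proved, stated in full; the proofs are below) =====
def Claim_equal_sumScores : Prop := ∀ (s : String), Dom_sumScores s → Spec_sumScores s (sumScores s)

-- ===== LEMMAS AND PROOFS =====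

-- the continuation condition of both inner while loops
def pvCond (cs : List Char) (i j : Nat) : Prop := i + j < cs.length ∧ cs[j]? = cs[i + j]?

lemma pvLcp_spec (cs : List Char) (i k : Nat) :
    k ≤ pvLcp cs i k ∧ (∀ j, k ≤ j → j < pvLcp cs i k → pvCond cs i j) ∧
      ¬ pvCond cs i (pvLcp cs i k) := by
  fun_induction pvLcp cs i k with
  | case1 k h ih =>
    obtain ⟨ih1, ih2, ih3⟩ := ih
    refine ⟨by omega, ?_, ih3⟩
    intro j hj hj2
    rcases Nat.eq_or_lt_of_le hj with rfl | hlt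
    · exact h
    · exact ih2 j hlt hj2
  | case2 k h =>
    exact ⟨Nat.le_refl k, fun j hj hj2 => absurd hj (by omega), h⟩

lemma pvLcp_congr (cs : List Char) (i k : Nat) (h : ∀ j, j < k → pvCond cs i j) :
    pvLcp cs i k = pvLcp cs i 0 := by
  obtain ⟨hk1, hk2, hk3⟩ := pvLcp_spec cs i k
  obtain ⟨h01, h02, h03⟩ := pvLcp_spec cs i 0
  by_contra hne
  rcases Nat.lt_or_ge (pvLcp cs i k) (pvLcp cs i 0) with hlt | hge
  · exact hk3 (h02 _ (Nat.zero_le _) hlt)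
  · have hlt : pvLcp cs i 0 < pvLcp cs i k := by omega
    rcases Nat.lt_or_ge (pvLcp cs i 0) k with h2 | h2
    · exact h03 (h _ h2)
    · exact h03 (hk2 _ h2 hlt)

lemma pvZWhile_eq (cs : List Char) (i k : Nat) : pvZWhile cs i k = pvLcp cs i k := by
  fun_induction pvZWhile cs i k with
  | case1 k h ih =>
    rw [ih]
    conv_rhs => rw [pvLcp]
    rw [dif_pos h]
  | case2 k h => rw [pvLcp, dif_neg h]

lemma pvLcp_le (cs : List Char) (i : Nat) (hi : i ≤ cs.length) :
    i + pvLcp cs i 0 ≤ cs.length := by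
  obtain ⟨-, h2, h3⟩ := pvLcp_spec cs i 0
  by_contra hc
  have hK : 1 ≤ pvLcp cs i 0 := by omega
  have hcond := h2 (pvLcp cs i 0 - 1) (Nat.zero_le _) (by omega)
  have := hcond.1
  omega

lemma pvLcp_zero (cs : List Char) : pvLcp cs 0 0 = cs.length := by
  obtain ⟨-, h2, h3⟩ := pvLcp_spec cs 0 0
  have hle : pvLcp cs 0 0 ≤ cs.length := by have := pvLcp_le cs 0 (Nat.zero_le _); omega
  rcases Nat.eq_or_lt_of_le hle with h | h
  · exact h
  · exact absurd ⟨by omega, by rw [Nat.zero_add]⟩ h3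

-- loop invariant for A's main loop, entering iteration i
def pvInv (cs : List Char) (i : Nat) (st : List Nat × Nat × Nat) : Prop :=
  st.1.length = cs.length ∧
  (∀ j, st.1.getD j 0 = if 1 ≤ j ∧ j < i then pvLcp cs j 0 else 0) ∧
  st.2.1 < i ∧
  (st.2.1 = 0 → st.2.2 = 0) ∧
  (1 ≤ st.2.1 → st.2.1 ≤ st.2.2 →
    st.2.2 < cs.length ∧ st.2.2 + 1 ≤ st.2.1 + pvLcp cs st.2.1 0)

lemma pvInv_step (cs : List Char) (i : Nat) (st : List Nat × Nat × Nat)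
    (h1 : 1 ≤ i) (h2 : i < cs.length) (hinv : pvInv cs i st) :
    pvInv cs (i + 1) (pvZStep cs st i) := by
  obtain ⟨z, l, r⟩ := st
  obtain ⟨hlen, hz, hl, hl0, hbox⟩ := hinv
  simp only at hlen hz hl hl0 hbox
  have hcondz0 : ∀ j, j < (if i ≤ r then min (r - i + 1) (z.getD (i - l) 0) else z.getD i 0) →
      pvCond cs i j := by
    intro j hj
    by_cases hir : i ≤ r
    · have hl1 : 1 ≤ l := by
        by_contra hc
        have hr0 := hl0 (by omega)
        omega
      obtain ⟨hrn, hrz⟩ := hbox hl1 (by omega)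
      have hd : z.getD (i - l) 0 = pvLcp cs (i - l) 0 := by
        rw [hz (i - l), if_pos ⟨by omega, by omega⟩]
      rw [if_pos hir, hd, Nat.lt_min] at hj
      obtain ⟨hj1, hj2⟩ := hj
      obtain ⟨-, hdspec2, -⟩ := pvLcp_spec cs (i - l) 0
      have hcd := hdspec2 j (Nat.zero_le _) hj2
      obtain ⟨-, hlspec2, -⟩ := pvLcp_spec cs l 0
      have hshift := hlspec2 ((i - l) + j) (Nat.zero_le _) (by omega)
      refine ⟨by omega, ?_⟩
      have heq : l + ((i - l) + j) = i + j := by omega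
      rw [hcd.2, ← heq, hshift.2]
    · rw [if_neg hir, hz i, if_neg (by omega)] at hj
      omega
  have hzi : pvZWhile cs i
      (if i ≤ r then min (r - i + 1) (z.getD (i - l) 0) else z.getD i 0) = pvLcp cs i 0 := by
    rw [pvZWhile_eq, pvLcp_congr cs i _ hcondz0]
  simp only [pvZStep, hzi]
  refine ⟨by simp [hlen], ?_, ?_, ?_, ?_⟩
  · intro j
    rw [List.getD_eq_getElem?_getD, List.getElem?_set]
    by_cases hij : i = j
    · subst hij
      rw [if_pos rfl, if_pos (by omega), if_pos ⟨h1, by omega⟩]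
      rfl
    · rw [if_neg hij, ← List.getD_eq_getElem?_getD, hz j]
      by_cases hc : 1 ≤ j ∧ j < i
      · rw [if_pos hc, if_pos ⟨hc.1, by omega⟩]
      · rw [if_neg hc, if_neg (by omega)]
  · split
    · simp
    · simp
      omega
  · split
    · simp; omega
    · simpa using hl0
  · split
    · simp only
      intro hi1 hir'
      have hK : 1 ≤ pvLcp cs i 0 := by omega
      have hle := pvLcp_le cs i (by omega)
      exact ⟨by omega, by omega⟩
    · simpa using hbox

lemma pvInv_fold (cs : List Char) (m : Nat) : ∀ (i : Nat) (st : List Nat × Nat × Nat),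
    1 ≤ i → i + m ≤ cs.length → pvInv cs i st →
    pvInv cs (i + m) ((List.range' i m).foldl (pvZStep cs) st) := by
  induction m with
  | zero => intro i st _ _ h; simpa using h
  | succ m ih =>
    intro i st h1 h2 hinv
    rw [List.range'_succ, List.foldl_cons]
    have hstep := pvInv_step cs i st h1 (by omega) hinv
    have := ih (i + 1) (pvZStep cs st i) (by omega) (by omega) hstep
    have heq : i + (m + 1) = (i + 1) + m := by omega
    rw [heq]
    exact this

lemma pvInv_init (cs : List Char) :
    pvInv cs 1 (List.replicate cs.length 0, 0, 0) := by
  refine ⟨by simp, ?_, Nat.zero_lt_one, fun _ => rfl, fun h => absurd h (by simp)⟩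
  intro j
  rw [List.getD_eq_getElem?_getD, List.getElem?_replicate]
  split <;> simp <;> omega

theorem pv_main (s : String) : sumScores s = sumScores_alt s := by
  by_cases hn : s.toList.length = 0
  · have hcs : s.toList = [] := List.eq_nil_of_length_eq_zero hn
    simp [sumScores, sumScores_alt, hcs]
  · set cs := s.toList with hcs
    set n := cs.length with hnn
    have hn1 : 1 ≤ n := by omega
    have hfold := pvInv_fold cs (n - 1) 1 (List.replicate n 0, 0, 0) (Nat.le_refl 1)
      (by omega) (pvInv_init cs)
    rw [show 1 + (n - 1) = n by omega] at hfold
    obtain ⟨hlen, hzf, -, -, -⟩ := hfold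
    set zf := ((List.range' 1 (n - 1)).foldl (pvZStep cs) (List.replicate n 0, 0, 0)).1 with hzfd
    have hzf_eq : zf = (List.range n).map (fun j => if 1 ≤ j ∧ j < n then pvLcp cs j 0 else 0) := by
      apply List.ext_getElem
      · simp only [List.length_map, List.length_range, hlen]
        omega
      · intro j hj1 hj2
        have : zf[j] = zf.getD j 0 := (List.getD_eq_getElem zf 0 hj1).symm
        rw [this, hzf j]
        simp
    have hrange : List.range n = 0 :: List.range' 1 (n - 1) := by
      have hsplit : n = (n - 1) + 1 := by omega
      conv_lhs => rw [List.range_eq_range', hsplit, List.range'_succ]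
    have hmapcongr :
        (List.range' 1 (n - 1)).map (fun j => if 1 ≤ j ∧ j < n then pvLcp cs j 0 else 0)
          = (List.range' 1 (n - 1)).map (fun j => pvLcp cs j 0) := by
      apply List.map_congr_left
      intro j hj
      rw [List.mem_range'_1] at hj
      rw [if_pos ⟨hj.1, by omega⟩]
    simp only [sumScores, sumScores_alt, ← hcs, ← hnn, ← hzfd]
    rw [PySem.List.foldl_add, hzf_eq, ← List.sum_eq_foldl, hrange]
    simp only [List.map_cons, List.sum_cons, hmapcongr]
    rw [if_neg (by omega), pvLcp_zero cs, ← hnn]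
    push_cast
    rw [List.map_map]
    simp [Function.comp_def]

-- ===== VERDICT (by name: the statement is the Claim_ definition above) =====
theorem sumScores_spec : Claim_equal_sumScores := by
  intro s _
  unfold Spec_sumScores
  exact pv_main s
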